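-- pv_equiv track=rewrite | github.com/ruth-hanna/software-tools-review | annotate_clinvar_snps.py | CountPAMs
-- ===== SOURCE A (Python) =====
-- nucleotide_codes_dict = {
-- 	'A':{'A'},
-- 	'C':{'C'},
-- 	'G':{'G'},
-- 	'T':{'T'},
-- 	'R':{'A','G'},
-- 	'Y':{'C','T'},
-- 	'W':{'A','T'},
-- 	'S':{'G','C'},
-- 	'M':{'A','C'},
-- 	'K':{'G','T'},
-- 	'B':{'G','C','T'},
-- 	'H':{'A','C','T'},
-- 	'D':{'A','G','T'},
-- 	'V':{'A','G','C'},
-- 	'N':{'A','G','C','T'}}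
--
-- def CountPAMs(sequence,pam):
-- 	# Takes in sequence (5' to 3') and a PAM to search for.
-- 	# Outputs a list of PAM locations, where the location indicates the 5' end of the PAM.
-- 	# CountPAMs is agnostic to strand.
-- 	# To find PAMs in the antisense strand, CountPAMs takes in the reverse complement (5' to 3') and outputs the 5' location of the PAM in the antisense strand.
--
-- 	pam_location_list = []
-- 	for base in range(0, len(sequence)+1-len(pam)):
-- 		pam_found = True
-- 		for i,nuc in enumerate(pam):
-- 			# Check whether nucleotide is in the set of allowed nucleotides for the PAM
-- 			if sequence[base+i] not in nucleotide_codes_dict[nuc]: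
-- 				pam_found = False
-- 				break
-- 		if pam_found == True:
-- 			pam_location_list.append([base,sequence[base:base+len(pam)]])
-- 	return pam_location_list
-- ===== SOURCE B (Python) =====
-- nucleotide_codes_dict = {
-- 	'A':{'A'},
-- 	'C':{'C'},
-- 	'G':{'G'},
-- 	'T':{'T'},
-- 	'R':{'A','G'},
-- 	'Y':{'C','T'},
-- 	'W':{'A','T'},
-- 	'S':{'G','C'},
-- 	'M':{'A','C'},
-- 	'K':{'G','T'},
-- 	'B':{'G','C','T'},
-- 	'H':{'A','C','T'},
-- 	'D':{'A','G','T'},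
-- 	'V':{'A','G','C'},
-- 	'N':{'A','G','C','T'}}
--
-- def CountPAMs(sequence, pam):
-- 	# Single left-to-right pass over the sequence, advancing all live partial
-- 	# matches in parallel (NFA-style), instead of re-scanning a window per base.
-- 	m = len(pam)
-- 	n = len(sequence)
-- 	if m == 0:
-- 		return [[b, ''] for b in range(n + 1)]
-- 	out = []
-- 	active = []  # pairs (base, i): the match started at base expects pam[i] here
-- 	for p, ch in enumerate(sequence):
-- 		if p <= n - m:
-- 			active.append((p, 0))
-- 		nxt = []
-- 		for base, i in active:
-- 			if ch in nucleotide_codes_dict[pam[i]]: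
-- 				if i + 1 == m:
-- 					out.append([base, sequence[base:base + m]])
-- 				else:
-- 					nxt.append((base, i + 1))
-- 		active = nxt
-- 	return out
-- ===== Notes on version B (the rewrite author's own statement) =====
-- stated objective: alternative
-- what changed: A re-scans a fresh window of the sequence for every candidate base with a nested loop; B makes a single left-to-right pass over the sequence, advancing all live partial matches in parallel (NFA-style active list) and emitting each completed match as it closes.
import Mathlib
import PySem

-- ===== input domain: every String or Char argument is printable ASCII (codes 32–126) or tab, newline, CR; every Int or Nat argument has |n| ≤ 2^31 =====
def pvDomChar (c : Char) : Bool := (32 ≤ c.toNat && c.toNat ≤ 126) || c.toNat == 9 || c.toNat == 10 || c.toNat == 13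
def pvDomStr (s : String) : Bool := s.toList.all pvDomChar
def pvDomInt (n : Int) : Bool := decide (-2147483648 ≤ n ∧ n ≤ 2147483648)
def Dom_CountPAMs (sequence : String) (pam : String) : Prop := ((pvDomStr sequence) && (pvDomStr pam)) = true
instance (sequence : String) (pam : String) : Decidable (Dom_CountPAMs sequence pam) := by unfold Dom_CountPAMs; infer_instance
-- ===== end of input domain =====

-- B replaces A's re-scan of a fresh window at every base by a single left-to-right pass
-- that advances all live partial matches in parallel (NFA-style); objective: alternative.

-- nucleotide_codes_dict, shared by both ports (Python: a module-level dict of sets).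
-- For a character outside the table Python raises KeyError; the port returns [] there
-- (membership then fails), and Pre_CountPAMs excludes every input where that lookup is reached.
def pvCodes (c : Char) : List Char :=
  match c with
  | 'A' => ['A'] | 'C' => ['C'] | 'G' => ['G'] | 'T' => ['T']
  | 'R' => ['A','G'] | 'Y' => ['C','T'] | 'W' => ['A','T'] | 'S' => ['G','C']
  | 'M' => ['A','C'] | 'K' => ['G','T'] | 'B' => ['G','C','T'] | 'H' => ['A','C','T']
  | 'D' => ['A','G','T'] | 'V' => ['A','G','C'] | 'N' => ['A','G','C','T']
  | _ => []

-- ===== PORT A =====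
-- inner 'for i,nuc in enumerate(pam)' loop with its break: returns pam_found
def pvScanA (seq : List Char) (base : Int) : List (Int × Char) → Bool
  | [] => true
  | (i, nuc) :: rest =>
    match PySem.List.pyGet? seq (base + i) with
    | none => false   -- IndexError (unreachable for base in the range A iterates)
    | some ch => if !((pvCodes nuc).contains ch) then false else pvScanA seq base rest

def CountPAMs (sequence : String) (pam : String) : List (Int × String) :=
  let seq := sequence.toList
  let pcs := pam.toList
  (PySem.List.pyRange 0 (PySem.List.len seq + 1 - PySem.List.len pcs) 1).foldl
    (fun acc base =>
      if pvScanA seq base (PySem.List.enumerate pcs) then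
        acc ++ [(base, String.ofList (PySem.List.slice seq (some base) (some (base + PySem.List.len pcs))))]
      else acc) []

-- ===== PORT B =====
-- body of B's inner 'for base, i in active' loop: state is (out, nxt)
def pvStepB (seq pcs : List Char) (m : Nat) (ch : Char)
    (st2 : List (Int × String) × List (Int × Nat)) (bi : Int × Nat) :
    List (Int × String) × List (Int × Nat) :=
  match pcs[bi.2]? with
  | none => st2   -- pam[i] (unreachable: i < m is an invariant of B's loop)
  | some nuc =>
    if (pvCodes nuc).contains ch then
      if bi.2 + 1 = m then
        (st2.1 ++ [(bi.1, String.ofList (PySem.List.slice seq (some bi.1) (some (bi.1 + (m : Int)))))], st2.2)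
      else (st2.1, st2.2 ++ [(bi.1, bi.2 + 1)])
    else st2

def CountPAMs_alt (sequence : String) (pam : String) : List (Int × String) :=
  let seq := sequence.toList
  let pcs := pam.toList
  let m := pcs.length
  let n := seq.length
  if m = 0 then
    (PySem.List.pyRange 0 ((n : Int) + 1) 1).map (fun b => (b, ""))
  else
    ((PySem.List.enumerate seq).foldl
      (fun (st : List (Int × String) × List (Int × Nat)) pc =>
        let act := if pc.1 ≤ (n : Int) - (m : Int) then st.2 ++ [(pc.1, 0)] else st.2
        act.foldl (pvStepB seq pcs m pc.2) (st.1, []))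
      ([], [])).1

-- ===== PRECONDITION & SPEC =====
def pvValid (c : Char) : Bool := !(pvCodes c).isEmpty
def pvPrefixOk (seq pcs : List Char) (b j : Nat) : Bool :=
  (List.range j).all (fun i => (pvCodes (pcs.getD i ' ')).contains (seq.getD (b + i) ' '))
-- Pre_ excludes exactly the inputs on which the Python A raises KeyError (and B raises it too):
-- pam contains a code outside the IUPAC table and some window of sequence that A scans matches
-- every code before the first such character, so the lookup is reached.
def Pre_CountPAMs (sequence : String) (pam : String) : Prop :=
  (match pam.toList.findIdx? (fun c => !pvValid c) with
   | none => true
   | some j => (List.range (sequence.toList.length + 1 - pam.toList.length)).all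
       (fun b => !pvPrefixOk sequence.toList pam.toList b j)) = true
instance (sequence : String) (pam : String) : Decidable (Pre_CountPAMs sequence pam) := by
  unfold Pre_CountPAMs; infer_instance
def pvWitness_CountPAMs : String × String := ("ACGTACGG", "NGG")

def Spec_CountPAMs (sequence : String) (pam : String) (out : List (Int × String)) : Prop :=
  out = CountPAMs_alt sequence pam
instance (sequence : String) (pam : String) (out : List (Int × String)) :
    Decidable (Spec_CountPAMs sequence pam out) := by unfold Spec_CountPAMs; infer_instance

-- ===== CLAIM (what is proved, stated in full; the proofs are below) =====
def Claim_equal_CountPAMs : Prop := ∀ (sequence : String) (pam : String),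
  Dom_CountPAMs sequence pam → Pre_CountPAMs sequence pam →
  Spec_CountPAMs sequence pam (CountPAMs sequence pam)

-- ===== LEMMAS AND PROOFS =====
def pvOk : List Char → List Char → Bool
  | _, [] => true
  | [], _ :: _ => false
  | ch :: ws, nc :: ps => (pvCodes nc).contains ch && pvOk ws ps

lemma pvOk_append_single (ps : List Char) (c : Char) (w : List Char) :
    pvOk w (ps ++ [c]) =
      (pvOk w ps && match w[ps.length]? with
        | some ch => (pvCodes c).contains ch
        | none => false) := by
  induction ps generalizing w with
  | nil => cases w <;> simp [pvOk]
  | cons p pt ih =>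
    cases w with
    | nil => simp [pvOk]
    | cons ch wt => simp [pvOk, ih, Bool.and_assoc]

lemma pvScanA_eq (seq : List Char) (b : Nat) (ps : List Char) (k : Nat) :
    pvScanA seq ((b : Int)) (PySem.List.enumerate ps (k : Int)) =
      pvOk (seq.drop (b + k)) ps := by
  induction ps generalizing k with
  | nil => simp [PySem.List.enumerate_nil, pvScanA, pvOk]
  | cons nuc rest ih =>
    rw [PySem.List.enumerate_cons]
    show pvScanA seq ((b : Int)) _ = _
    rw [pvScanA]
    have hcast : (b : Int) + (k : Int) = ((b + k : Nat) : Int) := by push_cast; ring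
    rw [hcast, PySem.List.pyGet?_natCast]
    cases hg : seq[b + k]? with
    | none =>
      have hlen : seq.length ≤ b + k := List.getElem?_eq_none_iff.mp hg
      rw [List.drop_eq_nil_of_le hlen]
      simp [pvOk]
    | some ch =>
      have hlt : b + k < seq.length := by
        rcases List.getElem?_eq_some_iff.mp hg with ⟨h, _⟩
        exact h
      have hdrop : seq.drop (b + k) = ch :: seq.drop (b + k + 1) := by
        rw [List.drop_eq_getElem_cons hlt]
        congr 1
        · have := List.getElem?_eq_getElem hlt
          rw [hg] at this; exact (Option.some.inj this).symm
      rw [hdrop]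
      have hk1 : (k : Int) + 1 = ((k + 1 : Nat) : Int) := by push_cast; ring
      rw [hk1, ih (k + 1)]
      show (if !(pvCodes nuc).contains ch then false else pvOk (seq.drop (b + (k+1))) rest) = _
      have : b + (k + 1) = b + k + 1 := by omega
      rw [this, pvOk]
      cases (pvCodes nuc).contains ch <;> simp
def pvSpec (seq pcs : List Char) : List (Int × String) :=
  (List.range (seq.length + 1 - pcs.length)).filterMap (fun b =>
    if pvOk (seq.drop b) pcs then
      some ((b : Int), String.ofList ((seq.drop b).take pcs.length))
    else none)

lemma map_filter_eq_filterMap {α β : Type} (l : List α) (p : α → Bool) (g : α → β) :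
    (l.filter p).map g = l.filterMap (fun x => if p x then some (g x) else none) := by
  induction l with
  | nil => rfl
  | cons x t ih =>
    by_cases h : p x <;> simp [h, ih]

lemma portA_eq_spec (sequence pam : String) :
    CountPAMs sequence pam = pvSpec sequence.toList pam.toList := by
  unfold CountPAMs pvSpec
  set seq := sequence.toList
  set pcs := pam.toList
  rw [PySem.List.foldl_append_if, PySem.List.pyRange_one]
  simp only [PySem.List.len_eq, List.nil_append, List.filter_map, List.map_map]
  have hK : (((seq.length : Int) + 1 - (pcs.length : Int)) - 0).toNat
      = seq.length + 1 - pcs.length := by omega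
  rw [hK, map_filter_eq_filterMap]
  apply List.filterMap_congr
  intro b _
  have h0 : (0 : Int) + (b : Int) = ((b : Int)) := by ring
  have hscan : pvScanA seq ((b : Int)) (PySem.List.enumerate pcs ((0 : Nat) : Int))
      = pvOk (seq.drop b) pcs := by
    simpa using pvScanA_eq seq b pcs 0
  simp only [Function.comp_apply, h0]
  rw [show PySem.List.enumerate pcs (0 : Int) = PySem.List.enumerate pcs ((0 : Nat) : Int) by norm_num,
      hscan]
  by_cases h : pvOk (seq.drop b) pcs <;>
    simp [h, PySem.List.slice_natCast_add]
lemma pvOk_nil_right (w : List Char) : pvOk w [] = true := by cases w <;> rfl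

-- element-level functions of B's inner loop
def pvFC (seq pcs : List Char) (m : Nat) (ch : Char) (bi : Int × Nat) : Option (Int × String) :=
  match pcs[bi.2]? with
  | none => none
  | some nuc =>
    if (pvCodes nuc).contains ch then
      if bi.2 + 1 = m then
        some (bi.1, String.ofList (PySem.List.slice seq (some bi.1) (some (bi.1 + (m : Int)))))
      else none
    else none

def pvFN (pcs : List Char) (m : Nat) (ch : Char) (bi : Int × Nat) : Option (Int × Nat) :=
  match pcs[bi.2]? with
  | none => none
  | some nuc =>
    if (pvCodes nuc).contains ch then
      if bi.2 + 1 = m then none else some (bi.1, bi.2 + 1)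
    else none

lemma innerFoldB (seq pcs : List Char) (m : Nat) (ch : Char) (L : List (Int × Nat))
    (out : List (Int × String)) (acc2 : List (Int × Nat)) :
    L.foldl (pvStepB seq pcs m ch) (out, acc2)
      = (out ++ L.filterMap (pvFC seq pcs m ch), acc2 ++ L.filterMap (pvFN pcs m ch)) := by
  induction L generalizing out acc2 with
  | nil => simp
  | cons bi t ih =>
    rw [List.foldl_cons, List.filterMap_cons, List.filterMap_cons]
    cases hp : pcs[bi.2]? with
    | none =>
      have h1 : pvStepB seq pcs m ch (out, acc2) bi = (out, acc2) := by
        unfold pvStepB; rw [hp]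
      have h2 : pvFC seq pcs m ch bi = none := by unfold pvFC; rw [hp]
      have h3 : pvFN pcs m ch bi = none := by unfold pvFN; rw [hp]
      rw [h1, h2, h3, ih]
    | some nuc =>
      by_cases hc : ch ∈ pvCodes nuc
      · by_cases he : bi.2 + 1 = m
        · have h1 : pvStepB seq pcs m ch (out, acc2) bi
              = (out ++ [(bi.1, String.ofList (PySem.List.slice seq (some bi.1) (some (bi.1 + (m : Int)))))], acc2) := by
            unfold pvStepB; rw [hp]; simp [hc, he]
          have h2 : pvFC seq pcs m ch bi
              = some (bi.1, String.ofList (PySem.List.slice seq (some bi.1) (some (bi.1 + (m : Int))))) := by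
            unfold pvFC; rw [hp]; simp [hc, he]
          have h3 : pvFN pcs m ch bi = none := by unfold pvFN; rw [hp]; simp [hc, he]
          rw [h1, h2, h3, ih]
          simp
        · have h1 : pvStepB seq pcs m ch (out, acc2) bi = (out, acc2 ++ [(bi.1, bi.2 + 1)]) := by
            unfold pvStepB; rw [hp]; simp [hc, he]
          have h2 : pvFC seq pcs m ch bi = none := by unfold pvFC; rw [hp]; simp [hc, he]
          have h3 : pvFN pcs m ch bi = some (bi.1, bi.2 + 1) := by unfold pvFN; rw [hp]; simp [hc, he]
          rw [h1, h2, h3, ih]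
          simp
      · have h1 : pvStepB seq pcs m ch (out, acc2) bi = (out, acc2) := by
          unfold pvStepB; rw [hp]; simp [hc]
        have h2 : pvFC seq pcs m ch bi = none := by unfold pvFC; rw [hp]; simp [hc]
        have h3 : pvFN pcs m ch bi = none := by unfold pvFN; rw [hp]; simp [hc]
        rw [h1, h2, h3, ih]

lemma filterMap_or_append {α β : Type} (l : List α) (f g : α → Option β)
    (h : ∀ i j, (hi : i < l.length) → (hj : j < l.length) → i ≤ j → g l[i] ≠ none → f l[j] = none) :
    l.filterMap (fun x => (f x).or (g x)) = l.filterMap f ++ l.filterMap g := by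
  induction l with
  | nil => simp
  | cons x t ih =>
    have htail : ∀ i j, (hi : i < t.length) → (hj : j < t.length) → i ≤ j → g t[i] ≠ none → f t[j] = none := by
      intro i j hi hj hij hg
      simpa using h (i+1) (j+1) (by simpa using hi) (by simpa using hj) (by omega) (by simpa using hg)
    rw [List.filterMap_cons, List.filterMap_cons, List.filterMap_cons]
    cases hf : f x with
    | some v =>
      have hgx : g x = none := by
        by_contra hgx
        have := h 0 0 (by simp) (by simp) le_rfl (by simpa using hgx)
        simp [hf] at this
      simp [hgx, ih htail]
    | none =>
      cases hg : g x with
      | none => simp [ih htail]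
      | some w =>
        have hft : ∀ j, (hj : j < t.length) → f t[j] = none := by
          intro j hj
          simpa using h 0 (j+1) (by simp) (by simpa using hj) (by omega) (by simp [hg])
        have hfnil : t.filterMap f = [] := by
          rw [List.filterMap_eq_nil_iff]
          intro a ha
          rcases List.mem_iff_getElem.mp ha with ⟨j, hj, rfl⟩
          simp [hft j hj]
        have hor : t.filterMap (fun x => (f x).or (g x)) = t.filterMap g := by
          apply List.filterMap_congr
          intro a ha
          rcases List.mem_iff_getElem.mp ha with ⟨j, hj, rfl⟩
          simp [hft j hj]
        simp [hfnil, hor]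

lemma filterMap_range_ext {β : Type} (f : Nat → Option β) (c a : Nat) (hc : c ≤ a)
    (h : ∀ b, c ≤ b → b < a → f b = none) :
    (List.range a).filterMap f = (List.range c).filterMap f := by
  induction a with
  | zero => have : c = 0 := by omega
            simp [this]
  | succ a ih =>
    by_cases hca : c = a + 1
    · simp [hca]
    · have hca' : c ≤ a := by omega
      rw [List.range_succ, List.filterMap_append, ih hca' (fun b h1 h2 => h b h1 (by omega))]
      simp [h a hca' (by omega)]

lemma pvOk_take_succ (seq pcs : List Char) (b j : Nat) (hj : j < pcs.length) (hb : b + j < seq.length) :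
    pvOk (seq.drop b) (pcs.take (j + 1))
      = (pvOk (seq.drop b) (pcs.take j) && (pvCodes pcs[j]).contains seq[b + j]) := by
  rw [List.take_add_one, List.getElem?_eq_getElem hj]
  simp only [Option.toList_some]
  rw [pvOk_append_single]
  have hlen : (pcs.take j).length = j := by simp [List.length_take]; omega
  rw [hlen, List.getElem?_drop, List.getElem?_eq_getElem (by omega : b + j < seq.length)]
def pvOutF (seq pcs : List Char) (q b : Nat) : Option (Int × String) :=
  if b + pcs.length ≤ q ∧ pvOk (seq.drop b) pcs then
    some ((b : Int), String.ofList ((seq.drop b).take pcs.length))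
  else none

def pvActF (seq pcs : List Char) (q b : Nat) : Option (Int × Nat) :=
  if b + pcs.length ≤ seq.length ∧ q - b < pcs.length ∧ pvOk (seq.drop b) (pcs.take (q - b)) then
    some ((b : Int), q - b)
  else none

lemma actF_bind_fC (seq pcs : List Char) (q b : Nat) (hq : q < seq.length) (hb : b ≤ q) :
    (pvActF seq pcs q b).bind (pvFC seq pcs pcs.length seq[q])
      = if b + pcs.length = q + 1 ∧ q - b < pcs.length
            ∧ pvOk (seq.drop b) (pcs.take (q - b)) = true
            ∧ (pvCodes (pcs.getD (q - b) ' ')).contains seq[q] = true then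
          some ((b : Int), String.ofList ((seq.drop b).take pcs.length))
        else none := by
  by_cases ha : b + pcs.length ≤ seq.length ∧ q - b < pcs.length
      ∧ pvOk (seq.drop b) (pcs.take (q - b)) = true
  · have hgd : pcs.getD (q - b) ' ' = pcs[q - b] := by
      simp [List.getD_eq_getElem?_getD, List.getElem?_eq_getElem ha.2.1]
    have h1 : pvActF seq pcs q b = some ((b : Int), q - b) := by
      unfold pvActF; rw [if_pos ha]
    rw [h1, show (some ((b : Int), q - b)).bind (pvFC seq pcs pcs.length seq[q])
        = pvFC seq pcs pcs.length seq[q] ((b : Int), q - b) from rfl]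
    unfold pvFC
    rw [List.getElem?_eq_getElem ha.2.1]
    dsimp only
    by_cases hcon : (pvCodes pcs[q - b]).contains seq[q] = true
    · by_cases hl : (q - b) + 1 = pcs.length
      · rw [if_pos hcon, if_pos hl,
            if_pos (show _ ∧ _ ∧ _ ∧ _ from
              ⟨by omega, ha.2.1, ha.2.2, by rw [hgd]; exact hcon⟩),
            PySem.List.slice_natCast_add]
      · rw [if_pos hcon, if_neg hl, if_neg (by rintro ⟨h1, -, -, -⟩; omega)]
    · rw [if_neg hcon, if_neg (by rintro ⟨-, -, -, hc⟩; rw [hgd] at hc; exact hcon hc)]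
  · have h1 : pvActF seq pcs q b = none := by
      unfold pvActF; rw [if_neg ha]
    rw [h1, show (none : Option (Int × Nat)).bind (pvFC seq pcs pcs.length seq[q]) = none from rfl,
        if_neg (by rintro ⟨h1, h2, h3, -⟩; exact ha ⟨by omega, h2, h3⟩)]

lemma pointAct (seq pcs : List Char) (q b : Nat)
    (hq : q < seq.length) (hb : b ≤ q) :
    pvActF seq pcs (q + 1) b = (pvActF seq pcs q b).bind (pvFN pcs pcs.length seq[q]) := by
  by_cases ha : b + pcs.length ≤ seq.length ∧ q - b < pcs.length
      ∧ pvOk (seq.drop b) (pcs.take (q - b)) = true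
  · have hstep := pvOk_take_succ seq pcs b (q - b) ha.2.1 (by omega)
    simp only [show b + (q - b) = q from by omega] at hstep
    have h1 : pvActF seq pcs q b = some ((b : Int), q - b) := by
      unfold pvActF; rw [if_pos ha]
    rw [h1, show (some ((b : Int), q - b)).bind (pvFN pcs pcs.length seq[q])
        = pvFN pcs pcs.length seq[q] ((b : Int), q - b) from rfl]
    unfold pvFN
    rw [List.getElem?_eq_getElem ha.2.1]
    dsimp only
    by_cases hcon : (pvCodes pcs[q - b]).contains seq[q] = true
    · by_cases hl : (q - b) + 1 = pcs.length
      · rw [if_pos hcon, if_pos hl]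
        unfold pvActF
        rw [if_neg (by rintro ⟨-, h2, -⟩; omega)]
      · rw [if_pos hcon, if_neg hl]
        unfold pvActF
        rw [if_pos (show _ ∧ _ ∧ _ from ⟨ha.1, by omega,
              by
                rw [show q + 1 - b = (q - b) + 1 from by omega, hstep]
                exact Bool.and_eq_true_iff.mpr ⟨ha.2.2, hcon⟩⟩),
            show q + 1 - b = (q - b) + 1 from by omega]
    · rw [if_neg hcon]
      unfold pvActF
      rw [if_neg (by
        rintro ⟨-, -, hok⟩
        rw [show q + 1 - b = (q - b) + 1 from by omega, hstep] at hok
        exact hcon (Bool.and_eq_true_iff.mp hok).2)]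
  · have h1 : pvActF seq pcs q b = none := by
      unfold pvActF; rw [if_neg ha]
    rw [h1, show (none : Option (Int × Nat)).bind (pvFN pcs pcs.length seq[q]) = none from rfl]
    unfold pvActF
    rw [if_neg (by
      rintro ⟨h1, h2, hok⟩
      have hj : q - b < pcs.length := by omega
      have hstep := pvOk_take_succ seq pcs b (q - b) hj (by omega)
      simp only [show b + (q - b) = q from by omega] at hstep
      rw [show q + 1 - b = (q - b) + 1 from by omega, hstep] at hok
      exact ha ⟨h1, hj, (Bool.and_eq_true_iff.mp hok).1⟩)]

lemma pointOut (seq pcs : List Char) (q b : Nat) (hm : 0 < pcs.length)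
    (hq : q < seq.length) (hb : b ≤ q) :
    pvOutF seq pcs (q + 1) b
      = (pvOutF seq pcs q b).or ((pvActF seq pcs q b).bind (pvFC seq pcs pcs.length seq[q])) := by
  rw [actF_bind_fC seq pcs q b hq hb]
  by_cases hbm : b + pcs.length ≤ q
  · rw [if_neg (by rintro ⟨h1, -⟩; omega), Option.or_none]
    unfold pvOutF
    by_cases hok : pvOk (seq.drop b) pcs = true
    · rw [if_pos ⟨by omega, hok⟩, if_pos ⟨hbm, hok⟩]
    · rw [if_neg (by rintro ⟨-, h⟩; exact hok h), if_neg (by rintro ⟨-, h⟩; exact hok h)]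
  · have hout : pvOutF seq pcs q b = none := by
      unfold pvOutF; rw [if_neg (by rintro ⟨h1, -⟩; omega)]
    rw [hout, Option.none_or]
    by_cases hbm1 : b + pcs.length = q + 1
    · have hj : q - b < pcs.length := by omega
      have hstep := pvOk_take_succ seq pcs b (q - b) hj (by omega)
      simp only [show b + (q - b) = q from by omega] at hstep
      have hgd : pcs.getD (q - b) ' ' = pcs[q - b] := by
        simp [List.getD_eq_getElem?_getD, List.getElem?_eq_getElem hj]
      have hfull : pvOk (seq.drop b) pcs
          = (pvOk (seq.drop b) (pcs.take (q - b)) && (pvCodes pcs[q - b]).contains seq[q]) := by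
        conv_lhs => rw [← List.take_length (l := pcs),
          show pcs.length = (q - b) + 1 from by omega]
        exact hstep
      unfold pvOutF
      by_cases hok : pvOk (seq.drop b) pcs = true
      · have hparts := Bool.and_eq_true_iff.mp (hfull ▸ hok)
        rw [if_pos ⟨by omega, hok⟩,
            if_pos ⟨hbm1, hj, hparts.1, by rw [hgd]; exact hparts.2⟩]
      · rw [if_neg (by rintro ⟨-, h⟩; exact hok h),
            if_neg (by
              rintro ⟨-, -, hpre, hcon⟩
              rw [hgd] at hcon
              exact hok (by rw [hfull, hpre, hcon]; rfl))]
    · unfold pvOutF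
      rw [if_neg (by rintro ⟨h1, -⟩; omega), if_neg (by rintro ⟨h1, -, -, -⟩; omega)]
lemma rangeSucc_act (seq pcs : List Char) (hm : 0 < pcs.length) (q : Nat) :
    (if ((q : Int)) ≤ (seq.length : Int) - (pcs.length : Int)
        then (List.range q).filterMap (pvActF seq pcs q) ++ [((q : Int), 0)]
        else (List.range q).filterMap (pvActF seq pcs q))
      = (List.range (q + 1)).filterMap (pvActF seq pcs q) := by
  rw [List.range_succ, List.filterMap_append]
  by_cases hc : q + pcs.length ≤ seq.length
  · rw [if_pos (by omega : ((q : Int)) ≤ (seq.length : Int) - (pcs.length : Int))]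
    have : pvActF seq pcs q q = some ((q : Int), 0) := by
      unfold pvActF
      rw [if_pos ⟨hc, by omega, by simp [pvOk_nil_right]⟩, Nat.sub_self]
    simp [this]
  · rw [if_neg (by omega : ¬ ((q : Int)) ≤ (seq.length : Int) - (pcs.length : Int))]
    have : pvActF seq pcs q q = none := by
      unfold pvActF
      rw [if_neg (by rintro ⟨h1, -⟩; omega)]
    simp [this]

lemma stepB (seq pcs : List Char) (hm : 0 < pcs.length) (q : Nat) (hq : q < seq.length) :
    ((if ((q : Int)) ≤ (seq.length : Int) - (pcs.length : Int)
        then (List.range q).filterMap (pvActF seq pcs q) ++ [((q : Int), 0)]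
        else (List.range q).filterMap (pvActF seq pcs q)).foldl
      (pvStepB seq pcs pcs.length seq[q]) ((List.range q).filterMap (pvOutF seq pcs q), []))
    = ((List.range (q + 1)).filterMap (pvOutF seq pcs (q + 1)),
       (List.range (q + 1)).filterMap (pvActF seq pcs (q + 1))) := by
  rw [rangeSucc_act seq pcs hm q, innerFoldB, List.nil_append]
  have hext : (List.range q).filterMap (pvOutF seq pcs q)
      = (List.range (q + 1)).filterMap (pvOutF seq pcs q) := by
    rw [List.range_succ, List.filterMap_append]
    have : pvOutF seq pcs q q = none := by
      unfold pvOutF; rw [if_neg (by rintro ⟨h1, -⟩; omega)]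
    simp [this]
  have hcomp1 : ((List.range (q + 1)).filterMap (pvActF seq pcs q)).filterMap
        (pvFC seq pcs pcs.length seq[q])
      = (List.range (q + 1)).filterMap
          (fun b => (pvActF seq pcs q b).bind (pvFC seq pcs pcs.length seq[q])) :=
    List.filterMap_filterMap
  have hcomp2 : ((List.range (q + 1)).filterMap (pvActF seq pcs q)).filterMap
        (pvFN pcs pcs.length seq[q])
      = (List.range (q + 1)).filterMap
          (fun b => (pvActF seq pcs q b).bind (pvFN pcs pcs.length seq[q])) :=
    List.filterMap_filterMap
  rw [hext, hcomp1, hcomp2]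
  refine Prod.ext ?_ ?_
  · show (List.range (q + 1)).filterMap (pvOutF seq pcs q)
        ++ (List.range (q + 1)).filterMap
            (fun b => (pvActF seq pcs q b).bind (pvFC seq pcs pcs.length seq[q]))
      = (List.range (q + 1)).filterMap (pvOutF seq pcs (q + 1))
    rw [← filterMap_or_append (List.range (q + 1)) (pvOutF seq pcs q)
        (fun b => (pvActF seq pcs q b).bind (pvFC seq pcs pcs.length seq[q]))
        (by
          intro i j hi hj hij hg
          dsimp only at hg
          rw [List.getElem_range] at hg ⊢
          have hi' : i < q + 1 := by simpa using hi
          have hj' : j < q + 1 := by simpa using hj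
          rw [actF_bind_fC seq pcs q i hq (by omega)] at hg
          by_cases hC : i + pcs.length = q + 1 ∧ q - i < pcs.length
              ∧ pvOk (seq.drop i) (pcs.take (q - i)) = true
              ∧ (pvCodes (pcs.getD (q - i) ' ')).contains seq[q] = true
          · unfold pvOutF
            rw [if_neg (by rintro ⟨h1, -⟩; omega)]
          · rw [if_neg hC] at hg
            exact absurd rfl hg)]
    apply List.filterMap_congr
    intro b hb
    rw [List.mem_range] at hb
    exact (pointOut seq pcs q b hm hq (by omega)).symm
  · show (List.range (q + 1)).filterMap
          (fun b => (pvActF seq pcs q b).bind (pvFN pcs pcs.length seq[q]))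
      = (List.range (q + 1)).filterMap (pvActF seq pcs (q + 1))
    apply List.filterMap_congr
    intro b hb
    rw [List.mem_range] at hb
    exact (pointAct seq pcs q b hq (by omega)).symm

lemma invB (seq pcs : List Char) (hm : 0 < pcs.length) :
    ∀ q, q ≤ seq.length →
    (PySem.List.enumerate (seq.take q)).foldl
      (fun (st : List (Int × String) × List (Int × Nat)) pc =>
        (if pc.1 ≤ (seq.length : Int) - (pcs.length : Int) then st.2 ++ [(pc.1, 0)] else st.2).foldl
          (pvStepB seq pcs pcs.length pc.2) (st.1, []))
      ([], [])
    = ((List.range q).filterMap (pvOutF seq pcs q), (List.range q).filterMap (pvActF seq pcs q)) := by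
  intro q
  induction q with
  | zero => intro _; simp [PySem.List.enumerate_nil]
  | succ q ih =>
    intro hq1
    have hq : q < seq.length := by omega
    rw [List.take_add_one, List.getElem?_eq_getElem hq]
    simp only [Option.toList_some]
    rw [PySem.List.enumerate_append, List.foldl_append, ih (by omega)]
    have hlen : (seq.take q).length = q := by simp; omega
    rw [hlen]
    simp only [PySem.List.enumerate_cons, PySem.List.enumerate_nil, List.foldl_cons, List.foldl_nil]
    rw [show (0 : Int) + (q : Nat) = ((q : Nat) : Int) from by omega]
    exact stepB seq pcs hm q hq
lemma filterMap_some' {α β : Type} (l : List α) (f : α → β) :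
    l.filterMap (fun x => some (f x)) = l.map f := by
  induction l <;> simp [*]

lemma portB_eq_spec (sequence pam : String) :
    CountPAMs_alt sequence pam = pvSpec sequence.toList pam.toList := by
  unfold CountPAMs_alt
  by_cases hm0 : pam.toList.length = 0
  · rw [if_pos hm0]
    have hnil : pam.toList = [] := List.length_eq_zero_iff.mp hm0
    unfold pvSpec
    rw [hnil, PySem.List.pyRange_one]
    have ht : (((sequence.toList.length : Int) + 1 - 0)).toNat = sequence.toList.length + 1 := by
      omega
    rw [ht, List.map_map]
    have h1 : (List.range (sequence.toList.length + 1 - List.length ([] : List Char))).filterMap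
        (fun b => if pvOk (sequence.toList.drop b) ([] : List Char) = true then
          some ((b : Int), String.ofList ((sequence.toList.drop b).take (List.length ([] : List Char))))
        else none)
        = (List.range (sequence.toList.length + 1)).map (fun (b : Nat) => ((b : Int), "")) := by
      rw [List.length_nil, Nat.sub_zero,
          ← filterMap_some' (List.range (sequence.toList.length + 1)) (fun (b : Nat) => ((b : Int), ""))]
      apply List.filterMap_congr
      intro b _
      simp [pvOk_nil_right]
    rw [h1]
    apply List.map_congr_left
    intro b _
    simp
  · rw [if_neg hm0]
    have hm : 0 < pam.toList.length := by omega
    have h := invB sequence.toList pam.toList hm sequence.toList.length le_rfl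
    rw [List.take_length] at h
    refine Eq.trans (congrArg Prod.fst h) ?_
    show (List.range sequence.toList.length).filterMap
        (pvOutF sequence.toList pam.toList sequence.toList.length) = _
    rw [filterMap_range_ext (pvOutF sequence.toList pam.toList sequence.toList.length)
        (sequence.toList.length + 1 - pam.toList.length) sequence.toList.length (by omega)
        (by
          intro b h1 h2
          unfold pvOutF
          rw [if_neg (by rintro ⟨h3, -⟩; omega)])]
    unfold pvSpec
    apply List.filterMap_congr
    intro b hb
    rw [List.mem_range] at hb
    unfold pvOutF
    by_cases hok : pvOk (sequence.toList.drop b) pam.toList = true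
    · rw [if_pos ⟨by omega, hok⟩, if_pos hok]
    · rw [if_neg (by rintro ⟨-, h⟩; exact hok h), if_neg hok]

-- ===== VERDICT (by name: the statement is the Claim_ definition above) =====
theorem CountPAMs_spec : Claim_equal_CountPAMs := by
  intro sequence pam _ _
  unfold Spec_CountPAMs
  rw [portA_eq_spec, portB_eq_spec]
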